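-- pv_equiv track=rewrite | github.com/sowiwia/IP-Algo1 | Python/simulacro.py | cant_max_apariciones_conseq
-- ===== SOURCE A (Python) =====
-- def cant_max_apariciones_conseq(v:list[int], numero: int) -> int:
--     res: int = 0
--     actual = 0
--
--     for num in v:
--         if num == numero:
--             actual +=1
--             if actual > res:
--                 res = actual
--         else:
--             actual = 0
--
--     return res
-- ===== SOURCE B (Python) =====
-- def cant_max_apariciones_conseq(v: list[int], numero: int) -> int:
--     # phase 1: run-length encode v into maximal runs of equal consecutive elements
--     runs = []
--     for num in v:
--         if runs and runs[-1][0] == num: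
--             runs[-1] = (num, runs[-1][1] + 1)
--         else:
--             runs.append((num, 1))
--     # phase 2: longest run whose value is numero
--     best = 0
--     for val, n in runs:
--         if val == numero and n > best:
--             best = n
--     return best
-- ===== Notes on version B (the rewrite author's own statement) =====
-- stated objective: alternative
-- what changed: Replaces the running-counter-with-reset single pass by a two-phase group-then-aggregate pass: first run-length encode the list into maximal runs, then scan the runs for the longest one equal to numero.
import Mathlib
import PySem

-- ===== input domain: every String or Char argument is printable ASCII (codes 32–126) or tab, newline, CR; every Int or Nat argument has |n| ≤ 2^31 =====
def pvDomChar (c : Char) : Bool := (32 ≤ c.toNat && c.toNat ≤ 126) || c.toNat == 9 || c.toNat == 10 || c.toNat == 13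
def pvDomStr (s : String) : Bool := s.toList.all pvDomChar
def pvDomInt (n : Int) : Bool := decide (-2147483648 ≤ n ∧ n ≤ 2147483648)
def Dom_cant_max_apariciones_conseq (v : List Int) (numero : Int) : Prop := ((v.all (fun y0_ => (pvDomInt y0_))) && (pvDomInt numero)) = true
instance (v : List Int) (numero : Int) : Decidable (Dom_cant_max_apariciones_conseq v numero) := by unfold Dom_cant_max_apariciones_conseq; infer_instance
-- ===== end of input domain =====

-- ===== PORT A =====
-- Port of A: one pass with a running counter `actual` reset on mismatch and a running max `res`.
def cant_max_apariciones_conseq (v : List Int) (numero : Int) : Int :=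
  (v.foldl (fun (st : Int × Int) num =>
      if num = numero then
        let actual := st.2 + 1
        (if actual > st.1 then actual else st.1, actual)
      else (st.1, 0)) (0, 0)).1

-- ===== PORT B =====
-- Port of B, phase 1 step: extend the last run (runs[-1]) or append a new run of length 1.
def pvStepRun (runs : List (Int × Int)) (num : Int) : List (Int × Int) :=
  match runs.getLast? with
  | some (k, n) => if k = num then runs.dropLast ++ [(num, n + 1)] else runs ++ [(num, 1)]
  | none => runs ++ [(num, 1)]

-- Port of B: run-length encode, then take the longest run whose value is numero.
def cant_max_apariciones_conseq_alt (v : List Int) (numero : Int) : Int :=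
  let runs := v.foldl pvStepRun []
  runs.foldl (fun best p => if p.1 = numero ∧ p.2 > best then p.2 else best) 0

-- ===== PRECONDITION & SPEC =====
def Spec_cant_max_apariciones_conseq (v : List Int) (numero : Int) (out : Int) : Prop := out = cant_max_apariciones_conseq_alt v numero
instance (v : List Int) (numero : Int) (out : Int) : Decidable (Spec_cant_max_apariciones_conseq v numero out) := by unfold Spec_cant_max_apariciones_conseq; infer_instance

-- ===== CLAIM (what is proved, stated in full; the proofs are below) =====
def Claim_equal_cant_max_apariciones_conseq : Prop := ∀ (v : List Int) (numero : Int), Dom_cant_max_apariciones_conseq v numero → Spec_cant_max_apariciones_conseq v numero (cant_max_apariciones_conseq v numero)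

-- ===== LEMMAS AND PROOFS =====

-- Head-based (reversed) version of pvStepRun, used only in the proofs.
def pvStepRev (rs : List (Int × Int)) (num : Int) : List (Int × Int) :=
  match rs with
  | (k, n) :: rest => if k = num then (num, n + 1) :: rest else (num, 1) :: (k, n) :: rest
  | [] => [(num, 1)]

-- Max run length among runs keyed by numero (0 if none).
def pvBigM (numero : Int) : List (Int × Int) → Int
  | [] => 0
  | (k, n) :: rest => if k = numero then max n (pvBigM numero rest) else pvBigM numero rest

-- Current `actual` value of A corresponding to a (reversed) runs state.
def pvCur (numero : Int) : List (Int × Int) → Int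
  | [] => 0
  | (k, n) :: _ => if k = numero then n else 0

lemma pvStepRun_reverse (numero : Int) (rs : List (Int × Int)) (num : Int) :
    pvStepRun rs.reverse num = (pvStepRev rs num).reverse := by
  cases rs with
  | nil => simp [pvStepRun, pvStepRev]
  | cons p rest =>
    obtain ⟨k, n⟩ := p
    simp only [pvStepRun, pvStepRev, List.reverse_cons, List.getLast?_concat,
      List.dropLast_concat]
    by_cases h : k = num <;> simp [h]

lemma pvFoldl_reverse (numero : Int) :
    ∀ (v : List Int) (rs : List (Int × Int)),
      v.foldl pvStepRun rs.reverse = (v.foldl (pvStepRev) rs).reverse := by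
  intro v
  induction v with
  | nil => intro rs; simp
  | cons x xs ih =>
    intro rs
    simp only [List.foldl_cons, pvStepRun_reverse numero rs x]
    exact ih _

lemma pvBigM_nonneg (numero : Int) : ∀ rs, 0 ≤ pvBigM numero rs := by
  intro rs
  induction rs with
  | nil => simp [pvBigM]
  | cons p rest ih =>
    obtain ⟨k, n⟩ := p
    by_cases h : k = numero
    · simp only [pvBigM, if_pos h]; omega
    · simpa [pvBigM, if_neg h] using ih

lemma pvBigM_append (numero : Int) (a b : List (Int × Int)) :
    pvBigM numero (a ++ b) = max (pvBigM numero a) (pvBigM numero b) := by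
  induction a with
  | nil =>
    simp only [List.nil_append, pvBigM]
    have := pvBigM_nonneg numero b
    omega
  | cons p rest ih =>
    obtain ⟨k, n⟩ := p
    by_cases h : k = numero
    · simp only [List.cons_append, pvBigM, if_pos h, ih]; omega
    · simp only [List.cons_append, pvBigM, if_neg h, ih]

lemma pvBigM_reverse (numero : Int) : ∀ rs, pvBigM numero rs.reverse = pvBigM numero rs := by
  intro rs
  induction rs with
  | nil => rfl
  | cons p rest ih =>
    obtain ⟨k, n⟩ := p
    rw [List.reverse_cons, pvBigM_append, ih]
    have := pvBigM_nonneg numero rest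
    by_cases h : k = numero
    · simp only [pvBigM, if_pos h]; omega
    · simp only [pvBigM, if_neg h]; omega

-- Phase 2 of B computes max b (pvBigM rs), for nonnegative b.
lemma pvScan2 (numero : Int) :
    ∀ (rs : List (Int × Int)) (b : Int), 0 ≤ b →
      rs.foldl (fun best p => if p.1 = numero ∧ p.2 > best then p.2 else best) b
        = max b (pvBigM numero rs) := by
  intro rs
  induction rs with
  | nil =>
    intro b hb
    simp only [List.foldl_nil, pvBigM]
    omega
  | cons p rest ih =>
    intro b hb
    obtain ⟨k, n⟩ := p
    simp only [List.foldl_cons]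
    by_cases h : k = numero
    · have h1 : (if k = numero ∧ n > b then n else b) = max b n := by
        by_cases h2 : n > b
        · rw [if_pos ⟨h, h2⟩]; omega
        · rw [if_neg (by tauto)]; omega
      rw [h1, ih (max b n) (by omega)]
      simp only [pvBigM, if_pos h]
      omega
    · have h1 : (if k = numero ∧ n > b then n else b) = b := by
        rw [if_neg (by tauto)]
      rw [h1, ih b hb]
      simp only [pvBigM, if_neg h]

-- Main invariant: A's fold over v, started from a state matching the (reversed) runs list rs,
-- ends with pvBigM of the final runs list.
lemma pvMain (numero : Int) :
    ∀ (v : List Int) (rs : List (Int × Int)) (res actual : Int),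
      actual = pvCur numero rs → res = pvBigM numero rs →
      (v.foldl (fun (st : Int × Int) num =>
          if num = numero then
            let actual := st.2 + 1
            (if actual > st.1 then actual else st.1, actual)
          else (st.1, 0)) (res, actual)).1
        = pvBigM numero (v.foldl (pvStepRev) rs) := by
  intro v
  induction v with
  | nil => intro rs res actual _ h2; simpa using h2
  | cons x xs ih =>
    intro rs res actual h1 h2
    simp only [List.foldl_cons]
    cases rs with
    | nil =>
      simp only [pvCur] at h1; simp only [pvBigM] at h2
      subst h1; subst h2
      by_cases hx : x = numero
      · have := ih [(x, 1)] (if (0:Int) + 1 > 0 then 0 + 1 else 0) (0 + 1)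
          (by simp [pvCur, hx]) (by simp [pvBigM, hx])
        simpa [hx, pvStepRev] using this
      · have := ih [(x, 1)] 0 0 (by simp [pvCur, hx]) (by simp [pvBigM, hx])
        simpa [hx, pvStepRev] using this
    | cons p rest =>
      obtain ⟨k, n⟩ := p
      by_cases hx : x = numero
      · by_cases hk : k = x
        · -- extend the current run of numero
          have hkn : k = numero := hk.trans hx
          have ha : actual = n := by simpa [pvCur, hkn] using h1
          have hr : res = max n (pvBigM numero rest) := by simpa [pvBigM, hkn] using h2
          have he : pvBigM numero ((x, n + 1) :: rest) = max (n + 1) (pvBigM numero rest) := by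
            simp [pvBigM, hx]
          have hres : (if actual + 1 > res then actual + 1 else res)
              = pvBigM numero ((x, n + 1) :: rest) := by
            rw [ha, hr, he]; split_ifs <;> omega
          have := ih ((x, n + 1) :: rest)
            (if actual + 1 > res then actual + 1 else res) (actual + 1)
            (by simp [pvCur, hx, ha]) hres
          simpa [hx, pvStepRev, hk] using this
        · -- start a new run of numero
          have hkn : k ≠ numero := fun h => hk (h.trans hx.symm)
          have ha : actual = 0 := by simpa [pvCur, hkn] using h1
          have hr : res = pvBigM numero rest := by simpa [pvBigM, hkn] using h2
          have he : pvBigM numero ((x, 1) :: (k, n) :: rest)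
              = max 1 (pvBigM numero rest) := by simp [pvBigM, hx, hkn]
          have hres : (if actual + 1 > res then actual + 1 else res)
              = pvBigM numero ((x, 1) :: (k, n) :: rest) := by
            have := pvBigM_nonneg numero rest
            rw [ha, hr, he]; split_ifs <;> omega
          have := ih ((x, 1) :: (k, n) :: rest)
            (if actual + 1 > res then actual + 1 else res) (actual + 1)
            (by simp [pvCur, hx, ha]) hres
          simpa [hx, pvStepRev, hkn] using this
      · -- x ≠ numero: actual resets; res and pvBigM are unchanged
        by_cases hk : k = x
        · have hkn : k ≠ numero := fun h => hx (hk ▸ h)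
          have := ih ((x, n + 1) :: rest) res 0 (by simp [pvCur, hx])
            (by subst hk; simpa [pvBigM, hkn, hx] using h2)
          simpa [pvStepRev, hk, hx] using this
        · have := ih ((x, 1) :: (k, n) :: rest) res 0 (by simp [pvCur, hx])
            (by simpa [pvBigM, hx] using h2)
          simpa [pvStepRev, hk, hx] using this

-- ===== VERDICT (by name: the statement is the Claim_ definition above) =====
theorem cant_max_apariciones_conseq_spec : Claim_equal_cant_max_apariciones_conseq := by
  intro v numero _
  unfold Spec_cant_max_apariciones_conseq cant_max_apariciones_conseq cant_max_apariciones_conseq_alt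
  have hruns : v.foldl pvStepRun [] = (v.foldl (pvStepRev) []).reverse := by
    simpa using pvFoldl_reverse numero v []
  rw [hruns, pvScan2 numero _ 0 le_rfl, pvBigM_reverse]
  rw [pvMain numero v [] 0 0 rfl rfl]
  have := pvBigM_nonneg numero (v.foldl (pvStepRev) [])
  omega
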